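-- pv_equiv track=rewrite | github.com/SuleymanKilincc/perfhub-ai | modern_desktop_app.py | _cpu_perf_text
-- ===== SOURCE A (Python) =====
-- def _cpu_perf_text(name, ps):
--     n = name.upper()
--     is_apple = "APPLE" in n or any(f"M{i}" in n for i in range(1,6))
--     if is_apple:
--         if ps>=100: return ["✅ Mükemmel: Video kurgu, render ve profesyonel iş yükü canavarı.", "⚠️ Oyun Puanı yüksek görünse de, macOS oyun kütüphanesi çok sınırlıdır.", "Dahili GPU ile çalışır, harici ekran kartı takılamaz."]
--         if ps>=70: return ["✅ Yüksek verimlilik: Yazılım Geliştirme, Logic Pro ve video düzenleme için ideal.", "⚠️ Sınırlı AAA oyun desteği (çoğunlukla çevrilmiş veya Rosetta 2)."]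
--         return ["✅ Günlük kullanım, pil ömrü ve ofis işleri için kusursuz.", "❌ Modern büyük prodüksiyonlu oyunlar için uygun değildir."]
--
--     if ps>=90: return ["✅ Darboğazsız: RTX 5090 dahil tüm GPU'larla mükemmel."]
--     if ps>=75: return ["✅ RTX 4090'a kadar darboğaz yapmaz."]
--     if ps>=60: return ["⚠️  RTX 4070 SUPER seviyesine kadar ideal. Üstü için upgrade önerilir."]
--     if ps>=45: return ["⚠️  RTX 4060 Ti ve altı GPU'larla eşleşmeli."]
--     return ["❌ Düşük CPU. Modern üst-orta GPU'larla darboğaz yapar."]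
-- ===== SOURCE B (Python) =====
-- _APPLE_TEXTS = [
--     ["✅ Günlük kullanım, pil ömrü ve ofis işleri için kusursuz.", "❌ Modern büyük prodüksiyonlu oyunlar için uygun değildir."],
--     ["✅ Yüksek verimlilik: Yazılım Geliştirme, Logic Pro ve video düzenleme için ideal.", "⚠️ Sınırlı AAA oyun desteği (çoğunlukla çevrilmiş veya Rosetta 2)."],
--     ["✅ Mükemmel: Video kurgu, render ve profesyonel iş yükü canavarı.", "⚠️ Oyun Puanı yüksek görünse de, macOS oyun kütüphanesi çok sınırlıdır.", "Dahili GPU ile çalışır, harici ekran kartı takılamaz."],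
-- ]
-- _GENERAL_TEXTS = [
--     ["❌ Düşük CPU. Modern üst-orta GPU'larla darboğaz yapar."],
--     ["⚠️  RTX 4060 Ti ve altı GPU'larla eşleşmeli."],
--     ["⚠️  RTX 4070 SUPER seviyesine kadar ideal. Üstü için upgrade önerilir."],
--     ["✅ RTX 4090'a kadar darboğaz yapmaz."],
--     ["✅ Darboğazsız: RTX 5090 dahil tüm GPU'larla mükemmel."],
-- ]
--
-- def _cpu_perf_text(name, ps):
--     # Single left-to-right scan of the upper-cased name for an Apple marker
--     # ("APPLE" or "M" followed by a digit 1-5), then arithmetic tier indexing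
--     # into a text table instead of an if-cascade.
--     n = name.upper()
--     is_apple = False
--     for i in range(len(n)):
--         if n.startswith("APPLE", i) or (n[i] == "M" and n[i+1:i+2] in ("1", "2", "3", "4", "5")):
--             is_apple = True
--             break
--     if is_apple:
--         return _APPLE_TEXTS[(ps >= 70) + (ps >= 100)]
--     return _GENERAL_TEXTS[(ps >= 45) + (ps >= 60) + (ps >= 75) + (ps >= 90)]
-- ===== Notes on version B (the rewrite author's own statement) =====
-- stated objective: alternative
-- what changed: Apple detection becomes one left-to-right scan of the name testing each position for 'APPLE' or 'M'+digit1-5 (instead of six independent substring searches), and the if-cascade on the score is replaced by arithmetic tier indexing: the count of thresholds met indexes a message table.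
import Mathlib
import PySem

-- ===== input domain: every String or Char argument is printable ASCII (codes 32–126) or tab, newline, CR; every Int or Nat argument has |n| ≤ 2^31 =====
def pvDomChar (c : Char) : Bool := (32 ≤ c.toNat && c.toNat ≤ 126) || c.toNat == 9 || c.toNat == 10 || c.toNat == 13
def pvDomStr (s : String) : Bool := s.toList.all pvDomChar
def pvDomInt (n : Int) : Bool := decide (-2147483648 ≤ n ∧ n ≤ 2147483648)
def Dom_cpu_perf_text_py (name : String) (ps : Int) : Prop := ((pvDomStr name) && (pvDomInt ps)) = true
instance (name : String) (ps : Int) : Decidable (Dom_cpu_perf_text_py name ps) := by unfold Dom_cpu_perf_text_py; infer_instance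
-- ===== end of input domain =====

-- B detects the Apple marker with one positional scan of the name and picks the message list by
-- arithmetic tier indexing (count of thresholds met) into a table, instead of six substring searches
-- plus an if-cascade (objective: alternative, same cost).

-- ===== PORT A =====
def cpu_perf_text_py (name : String) (ps : Int) : List String :=
  let n := PySem.Chars.upper name.toList  -- n = name.upper(); substring tests done on the char list (exact: Str.isIn = Chars.isIn on .toList)
  let is_apple := PySem.Chars.isIn ['A','P','P','L','E'] n ||
    (PySem.List.pyRange 1 6 1).any (fun i => PySem.Chars.isIn ('M' :: PySem.Int.toChars i) n)
  if is_apple then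
    if ps ≥ 100 then ["✅ Mükemmel: Video kurgu, render ve profesyonel iş yükü canavarı.", "⚠️ Oyun Puanı yüksek görünse de, macOS oyun kütüphanesi çok sınırlıdır.", "Dahili GPU ile çalışır, harici ekran kartı takılamaz."]
    else if ps ≥ 70 then ["✅ Yüksek verimlilik: Yazılım Geliştirme, Logic Pro ve video düzenleme için ideal.", "⚠️ Sınırlı AAA oyun desteği (çoğunlukla çevrilmiş veya Rosetta 2)."]
    else ["✅ Günlük kullanım, pil ömrü ve ofis işleri için kusursuz.", "❌ Modern büyük prodüksiyonlu oyunlar için uygun değildir."]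
  else
    if ps ≥ 90 then ["✅ Darboğazsız: RTX 5090 dahil tüm GPU'larla mükemmel."]
    else if ps ≥ 75 then ["✅ RTX 4090'a kadar darboğaz yapmaz."]
    else if ps ≥ 60 then ["⚠️  RTX 4070 SUPER seviyesine kadar ideal. Üstü için upgrade önerilir."]
    else if ps ≥ 45 then ["⚠️  RTX 4060 Ti ve altı GPU'larla eşleşmeli."]
    else ["❌ Düşük CPU. Modern üst-orta GPU'larla darboğaz yapar."]

-- ===== PORT B =====
def pvAppleTexts : List (List String) :=
  [["✅ Günlük kullanım, pil ömrü ve ofis işleri için kusursuz.", "❌ Modern büyük prodüksiyonlu oyunlar için uygun değildir."],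
   ["✅ Yüksek verimlilik: Yazılım Geliştirme, Logic Pro ve video düzenleme için ideal.", "⚠️ Sınırlı AAA oyun desteği (çoğunlukla çevrilmiş veya Rosetta 2)."],
   ["✅ Mükemmel: Video kurgu, render ve profesyonel iş yükü canavarı.", "⚠️ Oyun Puanı yüksek görünse de, macOS oyun kütüphanesi çok sınırlıdır.", "Dahili GPU ile çalışır, harici ekran kartı takılamaz."]]

def pvGeneralTexts : List (List String) :=
  [["❌ Düşük CPU. Modern üst-orta GPU'larla darboğaz yapar."],
   ["⚠️  RTX 4060 Ti ve altı GPU'larla eşleşmeli."],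
   ["⚠️  RTX 4070 SUPER seviyesine kadar ideal. Üstü için upgrade önerilir."],
   ["✅ RTX 4090'a kadar darboğaz yapmaz."],
   ["✅ Darboğazsız: RTX 5090 dahil tüm GPU'larla mükemmel."]]

-- Source B's loop body test at one position i of n: n.startswith("APPLE", i) or
-- (n[i] == "M" and n[i+1:i+2] in ("1",...,"5")); t is n's suffix starting at i (nonempty in the loop).
def pvHit : List Char → Bool
  | [] => false
  | c :: rest =>
    PySem.Chars.startswith (c :: rest) ['A','P','P','L','E'] ||
    (c == 'M' && (match rest with
                  | d :: _ => d == '1' || d == '2' || d == '3' || d == '4' || d == '5'  -- n[i+1:i+2] is the next char when present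
                  | [] => false))

-- Source B's 'for i in range(len(n)): if <hit>: is_apple = True; break' as recursion over suffixes.
def pvAppleScan : List Char → Bool
  | [] => false
  | c :: rest => pvHit (c :: rest) || pvAppleScan rest

def cpu_perf_text_py_alt (name : String) (ps : Int) : List String :=
  let n := PySem.Chars.upper name.toList
  if pvAppleScan n then
    pvAppleTexts.getD ((if ps ≥ 70 then 1 else 0) + (if ps ≥ 100 then 1 else 0)) []
  else
    pvGeneralTexts.getD ((if ps ≥ 45 then 1 else 0) + (if ps ≥ 60 then 1 else 0) + (if ps ≥ 75 then 1 else 0) + (if ps ≥ 90 then 1 else 0)) []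

-- ===== PRECONDITION & SPEC =====
def Spec_cpu_perf_text_py (name : String) (ps : Int) (out : List String) : Prop := out = cpu_perf_text_py_alt name ps
instance (name : String) (ps : Int) (out : List String) : Decidable (Spec_cpu_perf_text_py name ps out) := by unfold Spec_cpu_perf_text_py; infer_instance

-- ===== CLAIM =====
def Claim_equal_cpu_perf_text_py : Prop := ∀ (name : String) (ps : Int), Dom_cpu_perf_text_py name ps → Spec_cpu_perf_text_py name ps (cpu_perf_text_py name ps)

-- ===== LEMMAS AND PROOFS =====

lemma pvHit_iff (t : List Char) :
    pvHit t = true ↔ (['A','P','P','L','E'] <+: t ∨ ∃ d, (d = '1' ∨ d = '2' ∨ d = '3' ∨ d = '4' ∨ d = '5') ∧ ['M', d] <+: t) := by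
  match t with
  | [] => simp [pvHit]
  | [c] =>
      simp [pvHit, PySem.Chars.startswith_iff, List.cons_prefix_cons]
  | c :: d :: rest =>
      simp only [pvHit, Bool.or_eq_true, Bool.and_eq_true, beq_iff_eq,
        PySem.Chars.startswith_iff, List.cons_prefix_cons, List.nil_prefix, and_true]
      constructor
      · rintro (h | ⟨hc, hd⟩)
        · exact Or.inl h
        · refine Or.inr ⟨d, ?_, hc.symm, rfl⟩
          tauto
      · rintro (h | ⟨e, he, hc, he'⟩)
        · exact Or.inl h
        · refine Or.inr ⟨hc.symm, ?_⟩
          subst he'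
          tauto

lemma pvAppleScan_iff (s : List Char) :
    pvAppleScan s = true ↔ ∃ t, t <:+ s ∧ pvHit t = true := by
  induction s with
  | nil =>
      simp only [pvAppleScan]
      constructor
      · intro h; exact absurd h (by simp)
      · rintro ⟨t, ht, hh⟩
        rw [List.suffix_nil] at ht; subst ht
        exact absurd hh (by simp [pvHit])
  | cons c rest ih =>
      simp only [pvAppleScan, Bool.or_eq_true, ih]
      constructor
      · rintro (h | ⟨t, ht, hh⟩)
        · exact ⟨c :: rest, List.suffix_refl _, h⟩
        · exact ⟨t, ht.trans (List.suffix_cons c rest), hh⟩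
      · rintro ⟨t, ht, hh⟩
        rcases List.suffix_cons_iff.mp ht with h | h
        · subst h; exact Or.inl hh
        · exact Or.inr ⟨t, h, hh⟩

-- the scan computes exactly A's is_apple test
lemma pvAppleScan_eq (s : List Char) :
    pvAppleScan s = (PySem.Chars.isIn ['A','P','P','L','E'] s ||
      (PySem.List.pyRange 1 6 1).any (fun i => PySem.Chars.isIn ('M' :: PySem.Int.toChars i) s)) := by
  have hr : PySem.List.pyRange 1 6 1 = [1, 2, 3, 4, 5] := by decide
  rw [Bool.eq_iff_iff]
  rw [pvAppleScan_iff, hr]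
  simp only [List.any_cons, List.any_nil, Bool.or_eq_true, Bool.false_eq_true, or_false,
    PySem.Chars.isIn_iff_infix]
  have hd1 : PySem.Int.toChars 1 = ['1'] := by decide
  have hd2 : PySem.Int.toChars 2 = ['2'] := by decide
  have hd3 : PySem.Int.toChars 3 = ['3'] := by decide
  have hd4 : PySem.Int.toChars 4 = ['4'] := by decide
  have hd5 : PySem.Int.toChars 5 = ['5'] := by decide
  rw [hd1, hd2, hd3, hd4, hd5]
  constructor
  · rintro ⟨t, hts, hh⟩
    rcases (pvHit_iff t).mp hh with h | ⟨d, hd, hp⟩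
    · exact Or.inl (List.infix_iff_prefix_suffix.mpr ⟨t, h, hts⟩)
    · have : ['M', d] <:+: s := List.infix_iff_prefix_suffix.mpr ⟨t, hp, hts⟩
      rcases hd with h|h|h|h|h <;> subst h <;> tauto
  · intro h
    have : ∃ u, (u = (['A','P','P','L','E'] : List Char) ∨
        ∃ d, (d = '1' ∨ d = '2' ∨ d = '3' ∨ d = '4' ∨ d = '5') ∧ u = ['M', d]) ∧ u <:+: s := by
      rcases h with h | h | h | h | h | h
      · exact ⟨_, Or.inl rfl, h⟩
      · exact ⟨_, Or.inr ⟨'1', by tauto, rfl⟩, h⟩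
      · exact ⟨_, Or.inr ⟨'2', by tauto, rfl⟩, h⟩
      · exact ⟨_, Or.inr ⟨'3', by tauto, rfl⟩, h⟩
      · exact ⟨_, Or.inr ⟨'4', by tauto, rfl⟩, h⟩
      · exact ⟨_, Or.inr ⟨'5', by tauto, rfl⟩, h⟩
    obtain ⟨u, hu, hinf⟩ := this
    obtain ⟨t, hpt, hts⟩ := List.infix_iff_prefix_suffix.mp hinf
    refine ⟨t, hts, (pvHit_iff t).mpr ?_⟩
    rcases hu with rfl | ⟨d, hd, rfl⟩
    · exact Or.inl hpt
    · exact Or.inr ⟨d, hd, hpt⟩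

-- ===== VERDICT =====
theorem cpu_perf_text_py_spec : Claim_equal_cpu_perf_text_py := by
  intro name ps _
  unfold Spec_cpu_perf_text_py
  simp only [cpu_perf_text_py, cpu_perf_text_py_alt, pvAppleScan_eq, pvAppleTexts, pvGeneralTexts]
  split_ifs <;> first | rfl | omega
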